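-- pv_equiv track=rewrite | github.com/oleksmarkh/fetch-and-rotate | src/main.py | mix_urls
-- ===== SOURCE A (Python) =====
-- def mix_urls(urls: dict[str, list[str]]) -> list[str]:
--   """
--   Flattens a dict (URLs per webpage) into a list of all image URLs,
--   by picking URLs from each webpage (iterating over all lists with a common index):
--   ```
--   {
--     p0: [p0[0]],
--     p1: [],
--     p2: [p2[0], p2[1], p2[2], p2[3]],
--     p3: [p3[0], p3[1]],
--   } => [
--     p0[0], p2[0], p3[0],
--            p2[1], p3[1],
--            p2[2],
--            p2[3]
--   ]
--   ```
--   """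
--
--   url_list_list = urls.values()
--
--   if (len(url_list_list) == 0):
--     return []
--
--   if (len(url_list_list) == 1):
--     return list(url_list_list)[0]
--
--   result = []
--   for i in range(0, max(*[len(url_list) for url_list in url_list_list])):
--     for url_list in url_list_list:
--       if i < len(url_list):
--         result.append(url_list[i])
--
--   return result
-- ===== SOURCE B (Python) =====
-- def mix_urls(urls: dict[str, list[str]]) -> list[str]:
--   """Column-major flatten: bucket every URL into its column in one pass, then concatenate."""
--   columns: list[list[str]] = []
--   for url_list in urls.values():
--     for i, url in enumerate(url_list):
--       if i == len(columns):
--         columns.append([url])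
--       else:
--         columns[i].append(url)
--   result: list[str] = []
--   for column in columns:
--     result.extend(column)
--   return result
-- ===== Notes on version B (the rewrite author's own statement) =====
-- stated objective: alternative
-- what changed: Instead of scanning every URL list once per column index (a nested loop over range(maxlen) x lists), B makes a single pass over the data, bucketing each URL into a per-column list, and concatenates the columns at the end.
import Mathlib
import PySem

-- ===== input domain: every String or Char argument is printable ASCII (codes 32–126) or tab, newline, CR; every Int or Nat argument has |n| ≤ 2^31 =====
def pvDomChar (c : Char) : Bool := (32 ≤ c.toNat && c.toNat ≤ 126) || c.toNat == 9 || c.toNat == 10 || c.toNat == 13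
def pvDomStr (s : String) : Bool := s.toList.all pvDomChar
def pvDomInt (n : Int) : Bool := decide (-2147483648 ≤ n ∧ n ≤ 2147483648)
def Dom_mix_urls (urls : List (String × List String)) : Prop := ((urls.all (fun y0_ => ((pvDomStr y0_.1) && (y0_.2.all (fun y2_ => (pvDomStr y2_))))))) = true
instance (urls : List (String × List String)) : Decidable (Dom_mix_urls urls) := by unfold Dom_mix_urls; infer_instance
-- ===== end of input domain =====

-- B buckets every URL into its column list in a single pass over the data and then
-- concatenates the columns, instead of A's rescan of every list for each column index.

-- ===== PORT A =====
def mix_urls (urls : List (String × List String)) : List String :=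
  let url_list_list := (PySem.Dict.ofList urls).values
  if url_list_list.length == 0 then []
  else if url_list_list.length == 1 then PySem.List.pyGetD url_list_list 0 []
  else
    let maxlen := (PySem.List.max? (url_list_list.map (fun url_list => (url_list.length : Int))) (fun x => x)).getD 0
    (PySem.List.pyRange 0 maxlen 1).foldl
      (fun result i =>
        url_list_list.foldl
          (fun result url_list =>
            if i < (url_list.length : Int) then result ++ [PySem.List.pyGetD url_list i ""] else result)
          result)
      []

-- ===== PORT B =====
def mix_urls_alt (urls : List (String × List String)) : List String :=
  let columns := (PySem.Dict.ofList urls).values.foldl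
    (fun cols url_list =>
      (PySem.List.enumerate url_list 0).foldl
        (fun cols iu =>
          if iu.1 == (cols.length : Int) then cols ++ [[iu.2]]
          else cols.modify iu.1.toNat (fun c => c ++ [iu.2]))
        cols)
    []
  columns.foldl (fun result column => result ++ column) []

-- ===== PRECONDITION & SPEC =====
def Spec_mix_urls (urls : List (String × List String)) (out : List String) : Prop := out = mix_urls_alt urls
instance (urls : List (String × List String)) (out : List String) : Decidable (Spec_mix_urls urls out) := by unfold Spec_mix_urls; infer_instance

-- ===== CLAIM (what is proved, stated in full; the proofs are below) =====
def Claim_equal_mix_urls : Prop := ∀ (urls : List (String × List String)), Dom_mix_urls urls → Spec_mix_urls urls (mix_urls urls)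

-- ===== LEMMAS AND PROOFS =====

-- the effect of B's inner loop on the column list, as a structural recursion
def pvAdd : List (List String) → List String → List (List String)
  | cols, [] => cols
  | [], u :: us => [u] :: pvAdd [] us
  | c :: cs, u :: us => (c ++ [u]) :: pvAdd cs us

def pvMerge : Option (List String) → Option String → Option (List String)
  | some c, some u => some (c ++ [u])
  | some c, none => some c
  | none, some u => some [u]
  | none, none => none

theorem pv_modify_append (pre : List (List String)) (c : List String) (cs : List (List String)) (f : List String → List String) :
    (pre ++ c :: cs).modify pre.length f = pre ++ f c :: cs := by
  induction pre with
  | nil => simp [List.modify]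
  | cons p ps ih => simpa [List.modify] using ih

theorem pv_inner_eq_pvAdd (l : List String) : ∀ (pre cols : List (List String)),
    (PySem.List.enumerate l ((pre.length : Int))).foldl
      (fun cols iu =>
        if iu.1 == (cols.length : Int) then cols ++ [[iu.2]]
        else cols.modify iu.1.toNat (fun c => c ++ [iu.2]))
      (pre ++ cols) = pre ++ pvAdd cols l := by
  induction l with
  | nil => intro pre cols; simp [PySem.List.enumerate_nil, pvAdd]
  | cons u us ih =>
    intro pre cols
    rw [PySem.List.enumerate_cons]
    cases cols with
    | nil =>
      simp only [List.foldl_cons]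
      split_ifs with hcond
      · have e : (pre ++ ([] : List (List String))) ++ [[u]] = (pre ++ [[u]]) ++ [] := by simp
        rw [e]
        have h3 : ((pre.length : Int) + 1) = (((pre ++ [[u]]).length : Int)) := by simp
        rw [h3, ih (pre ++ [[u]]) []]
        simp [pvAdd]
      · simp at hcond
    | cons c cs =>
      simp only [List.foldl_cons]
      split_ifs with hcond
      · simp at hcond; omega
      · have ht : ((pre.length : Int)).toNat = pre.length := by simp
        rw [ht, pv_modify_append]
        have e : pre ++ (c ++ [u]) :: cs = (pre ++ [c ++ [u]]) ++ cs := by simp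
        rw [e]
        have h3 : ((pre.length : Int) + 1) = (((pre ++ [c ++ [u]]).length : Int)) := by simp
        rw [h3, ih (pre ++ [c ++ [u]]) cs]
        simp [pvAdd]

theorem pvAdd_getElem? (cols : List (List String)) (l : List String) (k : Nat) :
    (pvAdd cols l)[k]? = pvMerge cols[k]? l[k]? := by
  induction cols generalizing l k with
  | nil =>
    induction l generalizing k with
    | nil => simp [pvAdd, pvMerge]
    | cons u us ih =>
      cases k with
      | zero => simp [pvAdd, pvMerge]
      | succ k => simpa [pvAdd] using ih k
  | cons c cs ih =>
    cases l with
    | nil =>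
      show (c :: cs)[k]? = pvMerge (c :: cs)[k]? none
      cases (c :: cs)[k]? <;> rfl
    | cons u us =>
      cases k with
      | zero => simp [pvAdd, pvMerge]
      | succ k => simpa [pvAdd] using ih us k

theorem pvAdd_length (cols : List (List String)) (l : List String) :
    (pvAdd cols l).length = max cols.length l.length := by
  induction cols generalizing l with
  | nil =>
    induction l with
    | nil => simp [pvAdd]
    | cons u us ih => simp [pvAdd, ih]
  | cons c cs ih =>
    cases l with
    | nil => simp [pvAdd]
    | cons u us => simp [pvAdd, ih us]

theorem pv_foldl_pvAdd_getElem? (ls : List (List String)) : ∀ (cols : List (List String)) (k : Nat),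
    (ls.foldl pvAdd cols)[k]? = ls.foldl (fun acc l => pvMerge acc l[k]?) cols[k]? := by
  induction ls with
  | nil => intro cols k; simp
  | cons l rest ih =>
    intro cols k
    simp only [List.foldl_cons]
    rw [ih (pvAdd cols l) k, pvAdd_getElem?]

theorem pv_merge_fold_some (ls : List (List String)) : ∀ (c : List String) (k : Nat),
    ls.foldl (fun acc l => pvMerge acc l[k]?) (some c) = some (c ++ ls.filterMap (fun l => l[k]?)) := by
  induction ls with
  | nil => intro c k; simp
  | cons l rest ih =>
    intro c k
    simp only [List.foldl_cons]
    cases h : l[k]? with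
    | none =>
      have e : pvMerge (some c) none = some c := by simp [pvMerge]
      rw [e, ih c k]
      simp [h]
    | some u =>
      have e : pvMerge (some c) (some u) = some (c ++ [u]) := by simp [pvMerge]
      rw [e, ih (c ++ [u]) k]
      simp [h]

theorem pv_merge_fold_none (ls : List (List String)) (k : Nat) (x : List String)
    (h : ls.foldl (fun acc l => pvMerge acc l[k]?) none = some x) :
    x = ls.filterMap (fun l => l[k]?) := by
  induction ls with
  | nil => simp at h
  | cons l rest ih =>
    simp only [List.foldl_cons] at h
    cases hl : l[k]? with
    | none =>
      have e : pvMerge none none = none := by simp [pvMerge]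
      rw [hl, e] at h
      simp only [List.filterMap_cons, hl]
      exact ih h
    | some u =>
      have e : pvMerge none (some u) = some [u] := by simp [pvMerge]
      rw [hl, e, pv_merge_fold_some] at h
      simp only [List.filterMap_cons, hl]
      injection h with h'
      simpa using h'.symm

theorem pv_foldl_pvAdd_length (ls : List (List String)) : ∀ (cols : List (List String)),
    (ls.foldl pvAdd cols).length = ls.foldl (fun m l => max m l.length) cols.length := by
  induction ls with
  | nil => intro cols; rfl
  | cons l rest ih =>
    intro cols
    simp only [List.foldl_cons]
    rw [ih (pvAdd cols l), pvAdd_length]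

theorem pv_flatten_eq_flatMap_range (cols : List (List String)) :
    cols.flatten = (List.range cols.length).flatMap (fun k => cols[k]?.getD []) := by
  induction cols with
  | nil => simp
  | cons c cs ih =>
    rw [List.flatten_cons, List.length_cons, List.range_succ_eq_map, List.flatMap_cons]
    simp only [List.flatMap_map]
    simpa using congrArg (c ++ ·) ih

theorem pv_filter_map_eq_filterMap (ls : List (List String)) (k : Nat) :
    (ls.filter (fun l => decide ((k : Int) < (l.length : Int)))).map (fun l => PySem.List.pyGetD l (k : Int) "") =
      ls.filterMap (fun l => l[k]?) := by
  induction ls with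
  | nil => simp
  | cons l rest ih =>
    by_cases h : k < l.length
    · have h2 : l[k]? = some l[k] := List.getElem?_eq_getElem h
      have h1 : ((k : Int) < (l.length : Int)) := by exact_mod_cast h
      rw [List.filter_cons, if_pos (by simpa using h1), List.map_cons, ih]
      simp [h2, PySem.List.pyGetD_natCast, List.getD_eq_getElem?_getD]
    · have h2 : l[k]? = none := List.getElem?_eq_none (by omega)
      have h1 : ¬ ((k : Int) < (l.length : Int)) := by omega
      rw [List.filter_cons, if_neg (by simpa using h1), ih, List.filterMap_cons, h2]

theorem pv_cast_foldl_max (t : List (List String)) : ∀ (a : Nat),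
    ((t.foldl (fun m l => max m l.length) a : Nat) : Int) = (t.map (fun l => (l.length : Int))).foldl max (a : Int) := by
  induction t with
  | nil => intro a; rfl
  | cons l rest ih =>
    intro a
    simp only [List.foldl_cons, List.map_cons]
    rw [ih (max a l.length)]
    congr 1
    push_cast
    rfl

-- column list produced by B's first loop
theorem pv_cols_getD (vals : List (List String)) (k : Nat) (hk : k < (vals.foldl pvAdd []).length) :
    (vals.foldl pvAdd [])[k]?.getD [] = vals.filterMap (fun l => l[k]?) := by
  have h1 := pv_foldl_pvAdd_getElem? vals [] k
  simp only [List.getElem?_nil] at h1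
  cases h2 : (vals.foldl pvAdd [])[k]? with
  | none => exact absurd h2 (by simp [List.getElem?_eq_getElem hk])
  | some x =>
    rw [h2] at h1
    simp only [Option.getD_some]
    exact pv_merge_fold_none vals k x h1.symm

-- helpers for the equivalence
theorem pv_add_nil_map (l : List String) : pvAdd [] l = l.map (fun u => [u]) := by
  induction l with
  | nil => rfl
  | cons u us ih => simp [pvAdd, ih]

theorem pv_flatten_sing (l : List String) : (l.map (fun u => [u])).flatten = l := by
  induction l with
  | nil => rfl
  | cons u us ih => simp [ih]

theorem pv_inner_zero (l : List String) (cols : List (List String)) :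
    (PySem.List.enumerate l 0).foldl
      (fun cols iu =>
        if iu.1 == (cols.length : Int) then cols ++ [[iu.2]]
        else cols.modify iu.1.toNat (fun c => c ++ [iu.2]))
      cols = pvAdd cols l :=
  pv_inner_eq_pvAdd l [] cols

-- B's whole computation as a column-indexed flatMap
theorem pv_B_eq_flatMap (vals : List (List String)) :
    (vals.foldl
        (fun cols url_list =>
          (PySem.List.enumerate url_list 0).foldl
            (fun cols iu =>
              if iu.1 == (cols.length : Int) then cols ++ [[iu.2]]
              else cols.modify iu.1.toNat (fun c => c ++ [iu.2]))
            cols)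
        []).foldl (fun result column => result ++ column) [] =
    (List.range (vals.foldl (fun m l => max m l.length) 0)).flatMap
      (fun k => vals.filterMap (fun l => l[k]?)) := by
  have h1 : vals.foldl
      (fun cols url_list =>
        (PySem.List.enumerate url_list 0).foldl
          (fun cols iu =>
            if iu.1 == (cols.length : Int) then cols ++ [[iu.2]]
            else cols.modify iu.1.toNat (fun c => c ++ [iu.2]))
          cols)
      [] = vals.foldl pvAdd [] := by
    apply PySem.List.foldl_congr_mem
    intro acc x _
    exact pv_inner_zero x acc
  rw [h1, PySem.List.foldl_append_eq_flatten, List.nil_append,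
      pv_flatten_eq_flatMap_range]
  have hlen : (vals.foldl pvAdd []).length = vals.foldl (fun m l => max m l.length) 0 := by
    simpa using pv_foldl_pvAdd_length vals []
  rw [List.flatMap_def, List.flatMap_def, hlen]
  congr 1
  apply List.map_congr_left
  intro k hk
  rw [List.mem_range, ← hlen] at hk
  exact pv_cols_getD vals k hk

-- A's main double loop as the same column-indexed flatMap
theorem pv_A_third_eq_flatMap (vals : List (List String)) (hv : vals ≠ []) :
    (PySem.List.pyRange 0 ((PySem.List.max? (vals.map (fun l => (l.length : Int))) (fun x => x)).getD 0) 1).foldl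
      (fun result i =>
        vals.foldl
          (fun result l => if i < (l.length : Int) then result ++ [PySem.List.pyGetD l i ""] else result)
          result)
      [] =
    (List.range (vals.foldl (fun m l => max m l.length) 0)).flatMap
      (fun k => vals.filterMap (fun l => l[k]?)) := by
  obtain ⟨v, vs, rfl⟩ := List.exists_cons_of_ne_nil hv
  have hM : (PySem.List.max? ((v :: vs).map (fun l => (l.length : Int))) (fun x => x)).getD 0
      = (((v :: vs).foldl (fun m l => max m l.length) 0 : Nat) : Int) := by
    rw [List.map_cons, PySem.List.max?_id_cons]
    simp only [Option.getD_some, List.foldl_cons]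
    rw [pv_cast_foldl_max]
    simp
  rw [hM]
  have hin : (fun (result : List String) (i : Int) =>
      (v :: vs).foldl
        (fun result l => if i < (l.length : Int) then result ++ [PySem.List.pyGetD l i ""] else result)
        result)
      = fun result i =>
          result ++ ((v :: vs).filter (fun l => decide (i < (l.length : Int)))).map
            (fun l => PySem.List.pyGetD l i "") := by
    funext result i
    exact PySem.List.foldl_append_ite
      (p := fun l : List String => i < (l.length : Int))
      (f := fun l : List String => PySem.List.pyGetD l i "") ..
  rw [hin, PySem.List.foldl_append_eq_flatMap, List.nil_append, PySem.List.pyRange_one]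
  simp only [Int.sub_zero, Int.toNat_natCast]
  rw [List.flatMap_map, List.flatMap_def, List.flatMap_def]
  congr 1
  apply List.map_congr_left
  intro k _
  simp only [zero_add]
  exact pv_filter_map_eq_filterMap (v :: vs) k

-- the two sides agree for any list of value-lists
theorem pv_core (vals : List (List String)) :
    (if vals.length == 0 then []
     else if vals.length == 1 then PySem.List.pyGetD vals 0 []
     else
       (PySem.List.pyRange 0 ((PySem.List.max? (vals.map (fun l => (l.length : Int))) (fun x => x)).getD 0) 1).foldl
         (fun result i =>
           vals.foldl
             (fun result l => if i < (l.length : Int) then result ++ [PySem.List.pyGetD l i ""] else result)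
             result)
         []) =
    (vals.foldl
        (fun cols url_list =>
          (PySem.List.enumerate url_list 0).foldl
            (fun cols iu =>
              if iu.1 == (cols.length : Int) then cols ++ [[iu.2]]
              else cols.modify iu.1.toNat (fun c => c ++ [iu.2]))
            cols)
        []).foldl (fun result column => result ++ column) [] := by
  match vals with
  | [] => simp
  | [v] =>
    rw [if_neg (by simp), if_pos (by simp)]
    have hB : ([v].foldl
        (fun cols url_list =>
          (PySem.List.enumerate url_list 0).foldl
            (fun cols iu =>
              if iu.1 == (cols.length : Int) then cols ++ [[iu.2]]
              else cols.modify iu.1.toNat (fun c => c ++ [iu.2]))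
            cols)
        []) = pvAdd [] v := by
      simp only [List.foldl_cons, List.foldl_nil]
      exact pv_inner_zero v []
    rw [hB, PySem.List.foldl_append_eq_flatten, List.nil_append, pv_add_nil_map,
        pv_flatten_sing]
    simp [PySem.List.pyGetD, PySem.List.pyGet?, PySem.List.pyIdx?]
  | v1 :: v2 :: rest =>
    rw [if_neg (by simp), if_neg (by simp)]
    rw [pv_A_third_eq_flatMap (v1 :: v2 :: rest) (by simp), pv_B_eq_flatMap]

-- ===== VERDICT (by name: the statement is the Claim_ definition above) =====
theorem mix_urls_spec : Claim_equal_mix_urls := by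
  intro urls _
  unfold Spec_mix_urls mix_urls mix_urls_alt
  exact pv_core ((PySem.Dict.ofList urls).values)
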